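-- pv_equiv track=rewrite | github.com/osmandemir2533/Tic-Tac-Toe | app.py | is_early_draw
-- ===== SOURCE A (Python) =====
-- def is_early_draw(board):
--     n = len(board)
--     lines = []
--     for i in range(n):
--         lines.append([board[i][j] for j in range(n)])  # Satır
--         lines.append([board[j][i] for j in range(n)])  # Sütun
--     lines.append([board[i][i] for i in range(n)])      # Ana çapraz
--     lines.append([board[i][n-1-i] for i in range(n)])  # Yan çapraz
--
--     # Her satır/sütun/çaprazda sadece tek oyuncunun kazanma ihtimali varsa oyun devam eder
--     for line in lines:
--         if (set(line) <= {'X', ' '} or set(line) <= {'O', ' '}):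
--             return False
--     # Eğer tüm hatlarda iki oyuncu da varsa, kimse kazanamaz, erken beraberlik
--     return True
-- ===== SOURCE B (Python) =====
-- def is_early_draw(board):
--     n = len(board)
--     # blockx[k] == True  <=>  line k already contains a cell that is neither 'X' nor ' '
--     # (so X can no longer win line k); blocko likewise for 'O'.
--     # Line indices: 0..n-1 rows, n..2n-1 columns, 2n main diagonal, 2n+1 anti diagonal.
--     blockx = [False] * (2 * n + 2)
--     blocko = [False] * (2 * n + 2)
--     for i in range(n):
--         for j in range(n):
--             c = board[i][j]
--             nx = c != 'X' and c != ' '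
--             no = c != 'O' and c != ' '
--             blockx[i] = blockx[i] or nx
--             blocko[i] = blocko[i] or no
--             blockx[n + j] = blockx[n + j] or nx
--             blocko[n + j] = blocko[n + j] or no
--             if i == j:
--                 blockx[2 * n] = blockx[2 * n] or nx
--                 blocko[2 * n] = blocko[2 * n] or no
--             if i + j == n - 1:
--                 blockx[2 * n + 1] = blockx[2 * n + 1] or nx
--                 blocko[2 * n + 1] = blocko[2 * n + 1] or no
--     return all(blockx) and all(blocko)
-- ===== Notes on version B (the rewrite author's own statement) =====
-- stated objective: alternative
-- what changed: B never builds any line or any set: one nested pass over the cells saturates 2n+2 boolean 'this line can no longer be won by X / by O' flags (a cell that is neither that player's mark nor blank blocks the line), and the answer is that every flag is set -- the De Morgan dual of A's per-line set-subset tests.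
import Mathlib
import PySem

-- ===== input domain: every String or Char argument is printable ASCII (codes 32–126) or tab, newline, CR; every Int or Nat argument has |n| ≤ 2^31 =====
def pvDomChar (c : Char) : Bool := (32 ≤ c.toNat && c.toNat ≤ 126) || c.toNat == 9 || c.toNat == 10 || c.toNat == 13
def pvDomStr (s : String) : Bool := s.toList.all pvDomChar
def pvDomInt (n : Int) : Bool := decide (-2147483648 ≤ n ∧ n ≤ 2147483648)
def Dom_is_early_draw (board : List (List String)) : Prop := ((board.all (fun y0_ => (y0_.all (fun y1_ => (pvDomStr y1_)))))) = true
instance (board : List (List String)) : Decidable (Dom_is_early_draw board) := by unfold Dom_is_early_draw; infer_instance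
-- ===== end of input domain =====

-- B builds no line and no set at all: one nested pass over the cells saturates 2n+2 boolean
-- "this line is blocked for X / for O" flags and the answer is that all flags are set (alternative).

-- board[i][j]; total form, exact on indices in range (Pre_ guarantees that)
def pvCell (board : List (List String)) (i j : Int) : String :=
  PySem.List.pyGetD (PySem.List.pyGetD board i []) j ""

-- ===== PORT A =====
-- set(line) <= {'X',' '} or set(line) <= {'O',' '}
def pvLineDead (line : List String) : Bool :=
  PySem.Set.issubset (PySem.Set.ofList line) (PySem.Set.ofList ["X", " "]) ||
  PySem.Set.issubset (PySem.Set.ofList line) (PySem.Set.ofList ["O", " "])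

def is_early_draw (board : List (List String)) : Bool :=
  let n : Int := PySem.List.len board
  let lines : List (List String) :=
    (PySem.List.pyRange 0 n 1).foldl (fun acc i =>
      (acc ++ [(PySem.List.pyRange 0 n 1).map (fun j => pvCell board i j)])
          ++ [(PySem.List.pyRange 0 n 1).map (fun j => pvCell board j i)]) []
  let lines := lines ++ [(PySem.List.pyRange 0 n 1).map (fun i => pvCell board i i)]
  let lines := lines ++ [(PySem.List.pyRange 0 n 1).map (fun i => pvCell board i (n - 1 - i))]
  -- for line in lines: if <subset test>: return False / return True
  lines.all (fun line => !(pvLineDead line))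

-- ===== PORT B =====
-- flags[k] = flags[k] or v
def pvMark (l : List Bool) (k : Int) (v : Bool) : List Bool :=
  PySem.List.pySetD l k (PySem.List.pyGetD l k false || v)

def is_early_draw_alt (board : List (List String)) : Bool :=
  let n : Int := PySem.List.len board
  -- blockx = [False] * (2*n+2); blocko = [False] * (2*n+2)
  let st :=
    (PySem.List.pyRange 0 n 1).foldl (fun st i =>
      (PySem.List.pyRange 0 n 1).foldl (fun st j =>
        let c := pvCell board i j
        let nx : Bool := (c != "X") && (c != " ")
        let no : Bool := (c != "O") && (c != " ")
        let st := (pvMark st.1 i nx, pvMark st.2 i no)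
        let st := (pvMark st.1 (n + j) nx, pvMark st.2 (n + j) no)
        let st := if i = j then (pvMark st.1 (2*n) nx, pvMark st.2 (2*n) no) else st
        if i + j = n - 1 then (pvMark st.1 (2*n+1) nx, pvMark st.2 (2*n+1) no) else st) st)
      (PySem.List.pyRepeat [false] (2*n+2), PySem.List.pyRepeat [false] (2*n+2))
  -- return all(blockx) and all(blocko)
  st.1.all id && st.2.all id

-- ===== PRECONDITION & SPEC =====
-- Pre_ excludes exactly the ragged boards (some row shorter than len(board)): there the Python A
-- raises IndexError at board[i][j] / board[j][i].
def Pre_is_early_draw (board : List (List String)) : Prop :=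
  ∀ row ∈ board, board.length ≤ row.length
instance (board : List (List String)) : Decidable (Pre_is_early_draw board) := by
  unfold Pre_is_early_draw; infer_instance

def pvWitness_is_early_draw : List (List String) := [["X", "O"], ["O", "X"]]

def Spec_is_early_draw (board : List (List String)) (out : Bool) : Prop := out = is_early_draw_alt board
instance (board : List (List String)) (out : Bool) : Decidable (Spec_is_early_draw board out) := by unfold Spec_is_early_draw; infer_instance

-- ===== CLAIM (what is proved, stated in full; the proofs are below) =====
def Claim_equal_is_early_draw : Prop := ∀ (board : List (List String)), Dom_is_early_draw board → Pre_is_early_draw board → Spec_is_early_draw board (is_early_draw board)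

-- ===== LEMMAS AND PROOFS =====

-- Nat-level cell access and the four kinds of lines
def cellN (board : List (List String)) (i j : Nat) : String := (board.getD i []).getD j ""

def rowN (board : List (List String)) (n i : Nat) : List String :=
  (List.range n).map (fun j => cellN board i j)
def colN (board : List (List String)) (n j : Nat) : List String :=
  (List.range n).map (fun i => cellN board i j)
def diagN (board : List (List String)) (n : Nat) : List String :=
  (List.range n).map (fun i => cellN board i i)
def antiN (board : List (List String)) (n : Nat) : List String :=
  (List.range n).map (fun i => cellN board i (n - 1 - i))

-- the Nat-level step of B's inner loop, for ONE flag array with blocking predicate p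
def stepB (board : List (List String)) (n : Nat) (p : String → Bool)
    (l : List Bool) (i j : Nat) : List Bool :=
  let c := cellN board i j
  let l := l.set i (l.getD i false || p c)
  let l := l.set (n + j) (l.getD (n + j) false || p c)
  let l := if i = j then l.set (2*n) (l.getD (2*n) false || p c) else l
  if i + j + 1 = n then l.set (2*n+1) (l.getD (2*n+1) false || p c) else l

def nxP (c : String) : Bool := (c != "X") && (c != " ")
def noP (c : String) : Bool := (c != "O") && (c != " ")

theorem foldl_append_two {α β : Type} (f g : α → β) (l : List α) (acc : List β) :
    l.foldl (fun acc x => (acc ++ [f x]) ++ [g x]) acc = acc ++ l.flatMap (fun x => [f x, g x]) := by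
  induction l generalizing acc with
  | nil => simp
  | cons h t ih => simp [List.flatMap]

theorem A_characterization (board : List (List String)) :
    is_early_draw board =
      (((List.range board.length).flatMap (fun i =>
          [rowN board board.length i, colN board board.length i]))
        ++ [diagN board board.length, antiN board board.length]).all (fun l => !(pvLineDead l)) := by
  unfold is_early_draw
  simp only [PySem.List.len_eq, PySem.List.pyRange_zero_natCast, List.foldl_map, List.map_map]
  rw [foldl_append_two]
  have h1 : ∀ (i : Nat), List.map ((fun j => pvCell board (i:Int) j) ∘ fun k => ((k:Nat):Int)) (List.range board.length) = rowN board board.length i := by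
    intro i; simp [rowN, Function.comp, pvCell, cellN]
  have h2 : ∀ (i : Nat), List.map ((fun j => pvCell board j (i:Int)) ∘ fun k => ((k:Nat):Int)) (List.range board.length) = colN board board.length i := by
    intro i; simp [colN, Function.comp, pvCell, cellN]
  have h3 : List.map ((fun i => pvCell board i i) ∘ fun k => ((k:Nat):Int)) (List.range board.length) = diagN board board.length := by
    simp [diagN, Function.comp, pvCell, cellN]
  have h4 : List.map ((fun i => pvCell board i ((board.length:Int) - 1 - i)) ∘ fun k => ((k:Nat):Int)) (List.range board.length) = antiN board board.length := by
    unfold antiN; apply List.map_congr_left; intro i hi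
    simp only [List.mem_range] at hi
    have hc : ((board.length : Int) - 1 - (i:Int)) = ((board.length - 1 - i : Nat) : Int) := by omega
    simp [Function.comp, hc, pvCell, cellN]
  simp only [h1, h2, h3, h4, List.nil_append, List.append_assoc, List.singleton_append]

theorem anti_cond (i j n : Nat) : ((i:Int) + (j:Int) = (n:Int) - 1) ↔ (i + j + 1 = n) := by omega

-- a pair fold whose step acts componentwise splits into two folds
theorem foldl_prod_split {α β γ : Type} (f : α → γ → α) (g : β → γ → β) (l : List γ) (q : α × β) :
    l.foldl (fun p x => (f p.1 x, g p.2 x)) q = (l.foldl f q.1, l.foldl g q.2) := by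
  induction l generalizing q with
  | nil => rfl
  | cons h t ih => simp only [List.foldl_cons]; exact ih (f q.1 h, g q.2 h)

theorem B_characterization (board : List (List String)) :
    is_early_draw_alt board =
      (((List.range board.length).foldl (fun st i =>
          (List.range board.length).foldl (fun st j =>
            (stepB board board.length nxP st.1 i j, stepB board board.length noP st.2 i j)) st)
          (List.replicate (2*board.length+2) false, List.replicate (2*board.length+2) false)).1.all id &&
       ((List.range board.length).foldl (fun st i =>
          (List.range board.length).foldl (fun st j =>
            (stepB board board.length nxP st.1 i j, stepB board board.length noP st.2 i j)) st)
          (List.replicate (2*board.length+2) false, List.replicate (2*board.length+2) false)).2.all id) := by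
  unfold is_early_draw_alt pvMark
  simp only [PySem.List.len_eq, PySem.List.pyRepeat_singleton, PySem.List.pyRange_zero_natCast,
    List.foldl_map]
  have htn : ((2*(board.length:Int)+2)).toNat = 2*board.length+2 := by omega
  rw [htn]
  have hfold :
      (List.range board.length).foldl (fun st k =>
        (List.range board.length).foldl (fun st k2 =>
          let c := pvCell board ((k:Nat):Int) ((k2:Nat):Int)
          let nx : Bool := (c != "X") && (c != " ")
          let no : Bool := (c != "O") && (c != " ")
          let st := (PySem.List.pySetD st.1 ((k:Nat):Int) (PySem.List.pyGetD st.1 ((k:Nat):Int) false || nx),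
                     PySem.List.pySetD st.2 ((k:Nat):Int) (PySem.List.pyGetD st.2 ((k:Nat):Int) false || no))
          let st := (PySem.List.pySetD st.1 ((board.length:Int) + ((k2:Nat):Int)) (PySem.List.pyGetD st.1 ((board.length:Int) + ((k2:Nat):Int)) false || nx),
                     PySem.List.pySetD st.2 ((board.length:Int) + ((k2:Nat):Int)) (PySem.List.pyGetD st.2 ((board.length:Int) + ((k2:Nat):Int)) false || no))
          let st := if ((k:Nat):Int) = ((k2:Nat):Int) then
              (PySem.List.pySetD st.1 (2*(board.length:Int)) (PySem.List.pyGetD st.1 (2*(board.length:Int)) false || nx),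
               PySem.List.pySetD st.2 (2*(board.length:Int)) (PySem.List.pyGetD st.2 (2*(board.length:Int)) false || no)) else st
          if ((k:Nat):Int) + ((k2:Nat):Int) = (board.length:Int) - 1 then
              (PySem.List.pySetD st.1 (2*(board.length:Int)+1) (PySem.List.pyGetD st.1 (2*(board.length:Int)+1) false || nx),
               PySem.List.pySetD st.2 (2*(board.length:Int)+1) (PySem.List.pyGetD st.2 (2*(board.length:Int)+1) false || no)) else st) st)
        (List.replicate (2*board.length+2) false, List.replicate (2*board.length+2) false)
      =
      (List.range board.length).foldl (fun st i =>
        (List.range board.length).foldl (fun st j =>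
          (stepB board board.length nxP st.1 i j, stepB board board.length noP st.2 i j)) st)
        (List.replicate (2*board.length+2) false, List.replicate (2*board.length+2) false) := by
    apply PySem.List.foldl_congr_mem
    intro st i hi
    apply PySem.List.foldl_congr_mem
    intro st2 j hj
    have e1 : (board.length:Int) + ((j:Nat):Int) = ((board.length + j : Nat):Int) := by push_cast; ring
    have e2 : 2*(board.length:Int) = ((2*board.length : Nat):Int) := by push_cast; ring
    have e3 : ((2*board.length : Nat):Int) + 1 = ((2*board.length+1 : Nat):Int) := by push_cast; ring
    simp only [e1, e2, e3, anti_cond, Nat.cast_inj, PySem.List.pySetD_natCast,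
      PySem.List.pyGetD_natCast, pvCell, stepB, nxP, noP]
    split_ifs <;> rfl
  rw [hfold]

theorem getD_set (l : List Bool) (a : Nat) (v : Bool) (t : Nat) :
    (l.set a v).getD t false = if t = a ∧ a < l.length then v else l.getD t false := by
  rcases Nat.lt_or_ge t l.length with h | h
  · rw [List.getD_eq_getElem _ _ (by simpa using h), List.getElem_set]
    split_ifs with h1 h2 h3
    · rfl
    · omega
    · omega
    · rw [List.getD_eq_getElem _ _ h]
  · rw [List.getD_eq_default _ _ (by simpa using h), List.getD_eq_default _ _ h]
    rw [if_neg (by omega)]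

theorem stepB_length (board : List (List String)) (n : Nat) (p : String → Bool)
    (l : List Bool) (i j : Nat) : (stepB board n p l i j).length = l.length := by
  unfold stepB; split_ifs <;> simp

theorem foldl_stepB_length (board : List (List String)) (n : Nat) (p : String → Bool)
    (i : Nat) (st : List Bool) (m : Nat) :
    ((List.range m).foldl (fun l j => stepB board n p l i j) st).length = st.length := by
  induction m with
  | zero => rfl
  | succ m ih =>
    rw [List.range_succ, List.foldl_append, List.foldl_cons, List.foldl_nil, stepB_length, ih]

theorem stepB_getD (board : List (List String)) (n : Nat) (p : String → Bool)
    (l : List Bool) (i j : Nat) (hl : l.length = 2*n+2) (hi : i < n) (hj : j < n) (t : Nat) :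
    (stepB board n p l i j).getD t false =
      (if t = i ∨ t = n + j ∨ (t = 2*n ∧ i = j) ∨ (t = 2*n+1 ∧ i + j + 1 = n)
       then l.getD t false || p (cellN board i j) else l.getD t false) := by
  unfold stepB
  split_ifs with h1 h2 h3 <;>
    simp only [getD_set, List.length_set, hl] <;>
    split_ifs <;> simp_all <;> omega

theorem innerB (board : List (List String)) (n : Nat) (p : String → Bool) (i : Nat)
    (hi : i < n) (st : List Bool) (hst : st.length = 2*n+2) (m : Nat) (hm : m ≤ n) (t : Nat) :
    ((List.range m).foldl (fun l j => stepB board n p l i j) st).getD t false =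
      (if t = i then st.getD t false || ((List.range m).map (fun j => cellN board i j)).any p
       else if n ≤ t ∧ t < n + m then st.getD t false || p (cellN board i (t - n))
       else if t = 2*n ∧ i < m then st.getD t false || p (cellN board i i)
       else if t = 2*n+1 ∧ n-1-i < m then st.getD t false || p (cellN board i (n-1-i))
       else st.getD t false) := by
  induction m with
  | zero =>
    simp only [List.range_zero, List.foldl_nil, List.map_nil, List.any_nil, Bool.or_false]
    split_ifs <;> first | rfl | omega
  | succ m ih =>
    have hm' : m ≤ n := by omega
    rw [List.range_succ, List.foldl_append, List.foldl_cons, List.foldl_nil,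
      stepB_getD board n p _ i m (by rw [foldl_stepB_length, hst]) hi (by omega) t,
      ih hm', List.map_append, List.any_append]
    split_ifs <;>
      first
        | rfl
        | omega
        | rw [show t - n = m from by omega]
        | rw [show i = m from by omega]
        | rw [show n - 1 - i = m from by omega]
        | simp [Bool.or_assoc]

theorem getD_replicate (L t : Nat) : (List.replicate L false).getD t false = false := by
  rcases Nat.lt_or_ge t L with h | h
  · rw [List.getD_eq_getElem _ _ (by simpa using h)]; simp
  · rw [List.getD_eq_default _ _ (by simpa using h)]

theorem foldl_outer_length (board : List (List String)) (n : Nat) (p : String → Bool) (k : Nat) :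
    (((List.range k).foldl (fun st i => (List.range n).foldl (fun l j => stepB board n p l i j) st)
       (List.replicate (2*n+2) false))).length = 2*n+2 := by
  induction k with
  | zero => simp
  | succ k ih =>
    rw [List.range_succ, List.foldl_append, List.foldl_cons, List.foldl_nil,
      foldl_stepB_length, ih]

theorem outerB (board : List (List String)) (n : Nat) (p : String → Bool)
    (k : Nat) (hk : k ≤ n) (t : Nat) :
    (((List.range k).foldl (fun st i => (List.range n).foldl (fun l j => stepB board n p l i j) st)
       (List.replicate (2*n+2) false))).getD t false =
      (if t < n then (if t < k then (rowN board n t).any p else false)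
       else if t < 2*n then ((List.range k).map (fun i => cellN board i (t-n))).any p
       else if t = 2*n then ((List.range k).map (fun i => cellN board i i)).any p
       else if t = 2*n+1 then ((List.range k).map (fun i => cellN board i (n-1-i))).any p
       else false) := by
  induction k with
  | zero =>
    simp only [List.range_zero, List.foldl_nil, getD_replicate, List.map_nil, List.any_nil]
    split_ifs <;> first | rfl | omega
  | succ k ih =>
    have hk' : k ≤ n := by omega
    have hkn : k < n := by omega
    rw [List.range_succ, List.foldl_append, List.foldl_cons, List.foldl_nil,
      innerB board n p k hkn _ (foldl_outer_length board n p k) n (le_refl n) t,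
      ih hk']
    split_ifs <;>
      first
        | rfl
        | omega
        | (rw [show t = k from by omega]; simp [rowN])
        | simp

theorem all_id_eq (l : List Bool) : (l.all id = true) ↔ ∀ t, t < l.length → l.getD t false = true := by
  rw [List.all_eq_true]
  constructor
  · intro h t ht
    rw [List.getD_eq_getElem _ _ ht]
    exact h _ (List.getElem_mem ht)
  · intro h x hx
    obtain ⟨t, ht, rfl⟩ := List.mem_iff_getElem.mp hx
    have := h t ht
    rw [List.getD_eq_getElem _ _ ht] at this
    exact this

theorem not_dead (l : List String) : (!pvLineDead l) = (l.any nxP && l.any noP) := by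
  unfold pvLineDead nxP noP
  rw [Bool.eq_iff_iff]
  simp only [Bool.eq_false_iff, Ne, PySem.Set.issubset_iff, PySem.Set.mem_ofList,
    List.any_eq_true, not_forall, Bool.and_eq_true, Bool.not_or, Bool.not_eq_eq_eq_not,
    Bool.not_true]
  simp [And.comm, and_assoc]

theorem outer_prod_split (board : List (List String)) (n : Nat) (l : List Nat)
    (q : List Bool × List Bool) :
    l.foldl (fun st i => (List.range n).foldl (fun st j =>
        (stepB board n nxP st.1 i j, stepB board n noP st.2 i j)) st) q
      = (l.foldl (fun st i => (List.range n).foldl (fun l2 j => stepB board n nxP l2 i j) st) q.1,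
         l.foldl (fun st i => (List.range n).foldl (fun l2 j => stepB board n noP l2 i j) st) q.2) := by
  induction l generalizing q with
  | nil => rfl
  | cons h t ih =>
    rw [List.foldl_cons, List.foldl_cons, List.foldl_cons,
      foldl_prod_split (fun a j => stepB board n nxP a h j)
        (fun b j => stepB board n noP b h j) (List.range n) q]
    exact ih _

theorem final_assembly (board : List (List String)) :
    is_early_draw board = is_early_draw_alt board := by
  rw [A_characterization, B_characterization]
  rw [outer_prod_split]
  rw [Bool.eq_iff_iff, Bool.and_eq_true, all_id_eq, all_id_eq]
  simp only [foldl_outer_length]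
  simp only [outerB board board.length nxP board.length (le_refl board.length),
    outerB board board.length noP board.length (le_refl board.length)]
  simp only [not_dead, List.all_append, List.all_flatMap, List.all_cons, List.all_nil,
    Bool.and_eq_true, List.all_eq_true, List.mem_range, Bool.and_true]
  set n := board.length with hn
  constructor
  · rintro ⟨hrc, ⟨hdx, hdo⟩, hax, hao⟩
    constructor
    · intro t ht
      split_ifs with c1 c2 c3 c4
      · exact (hrc t c1).1.1
      · exact (hrc (t - n) (by omega)).2.1
      · exact hdx
      · exact hax
      · omega
    · intro t ht
      split_ifs with c1 c2 c3 c4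
      · exact (hrc t c1).1.2
      · exact (hrc (t - n) (by omega)).2.2
      · exact hdo
      · exact hao
      · omega
  · rintro ⟨hx, ho⟩
    refine ⟨fun i hi => ⟨⟨?_, ?_⟩, ?_, ?_⟩, ⟨?_, ?_⟩, ?_, ?_⟩
    · have h := hx i (by omega); rw [if_pos hi, if_pos hi] at h; exact h
    · have h := ho i (by omega); rw [if_pos hi, if_pos hi] at h; exact h
    · have h := hx (n + i) (by omega)
      rw [if_neg (by omega), if_pos (by omega), show n + i - n = i from by omega] at h
      exact h
    · have h := ho (n + i) (by omega)
      rw [if_neg (by omega), if_pos (by omega), show n + i - n = i from by omega] at h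
      exact h
    · have h := hx (2*n) (by omega)
      rw [if_neg (by omega), if_neg (by omega), if_pos rfl] at h
      exact h
    · have h := ho (2*n) (by omega)
      rw [if_neg (by omega), if_neg (by omega), if_pos rfl] at h
      exact h
    · have h := hx (2*n+1) (by omega)
      rw [if_neg (by omega), if_neg (by omega), if_neg (by omega), if_pos rfl] at h
      exact h
    · have h := ho (2*n+1) (by omega)
      rw [if_neg (by omega), if_neg (by omega), if_neg (by omega), if_pos rfl] at h
      exact h

-- ===== VERDICT (by name: the statement is the Claim_ definition above) =====
theorem is_early_draw_spec : Claim_equal_is_early_draw := by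
  intro board _ _
  unfold Spec_is_early_draw
  exact final_assembly board
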